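-- pv_equiv track=rewrite | github.com/mohammadfaiizan/ProjectI | DSA/Theory/Matrix/002_matrix_traversal_patterns.py | zigzag_column_traversal
-- ===== SOURCE A (Python) =====
-- from typing import List, Generator
--
-- def zigzag_column_traversal(matrix: List[List[int]]) -> List[int]:
--     """Zigzag traversal by columns
--     Time: O(m*n), Space: O(1) excluding output
--     """
--     if not matrix or not matrix[0]:
--         return []
--
--     m, n = len(matrix), len(matrix[0])
--     result = []
--
--     for j in range(n):
--         if j % 2 == 0:
--             # Even columns: top to bottom
--             for i in range(m):
--                 result.append(matrix[i][j])
--         else: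
--             # Odd columns: bottom to top
--             for i in range(m - 1, -1, -1):
--                 result.append(matrix[i][j])
--
--     return result
-- ===== SOURCE B (Python) =====
-- def zigzag_column_traversal(matrix):
--     if not matrix or not matrix[0]:
--         return []
--     m, n = len(matrix), len(matrix[0])
--     result = []
--     for k in range(m * n):
--         j, r = divmod(k, m)
--         i = r if j % 2 == 0 else m - 1 - r
--         result.append(matrix[i][j])
--     return result
-- ===== Notes on version B (the rewrite author's own statement) =====
-- stated objective: alternative
-- what changed: Replaces A's nested column/parity loops with a single flat loop over k in range(m*n), recovering the column j = k // m and the zigzag row i from divmod index arithmetic.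
import Mathlib
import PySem

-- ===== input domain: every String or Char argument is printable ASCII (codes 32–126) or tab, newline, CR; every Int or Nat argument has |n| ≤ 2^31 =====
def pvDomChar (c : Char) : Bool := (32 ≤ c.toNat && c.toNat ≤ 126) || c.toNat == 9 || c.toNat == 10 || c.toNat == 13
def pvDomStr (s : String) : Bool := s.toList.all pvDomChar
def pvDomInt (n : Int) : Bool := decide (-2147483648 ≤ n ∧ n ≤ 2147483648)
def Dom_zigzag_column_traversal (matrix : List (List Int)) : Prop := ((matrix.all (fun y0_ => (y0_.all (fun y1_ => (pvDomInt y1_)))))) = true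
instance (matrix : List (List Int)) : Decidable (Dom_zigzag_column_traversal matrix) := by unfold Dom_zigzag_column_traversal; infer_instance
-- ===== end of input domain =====

-- B flattens A's nested column/parity loops into one loop over k in range(m*n)
-- with divmod index arithmetic (objective: alternative decomposition, same cost).

-- matrix[i][j]: two pyGet? lookups; Pre_ guarantees both indices are in range.
def pvIdx (matrix : List (List Int)) (i j : Int) : Int :=
  (PySem.List.pyGet? ((PySem.List.pyGet? matrix i).getD []) j).getD 0

-- ===== PORT A =====
def zigzag_column_traversal (matrix : List (List Int)) : List Int :=
  if matrix = [] ∨ matrix.headD [] = [] then []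
  else
    let m : Int := matrix.length
    let n : Int := (matrix.headD []).length
    (PySem.List.pyRange 0 n 1).foldl (fun result j =>
      if PySem.Int.mod j 2 = 0 then
        (PySem.List.pyRange 0 m 1).foldl (fun result i => result ++ [pvIdx matrix i j]) result
      else
        (PySem.List.pyRange (m - 1) (-1) (-1)).foldl (fun result i => result ++ [pvIdx matrix i j]) result) []

-- ===== PORT B =====
def zigzag_column_traversal_alt (matrix : List (List Int)) : List Int :=
  if matrix = [] ∨ matrix.headD [] = [] then []
  else
    let m : Int := matrix.length
    let n : Int := (matrix.headD []).length
    (PySem.List.pyRange 0 (m * n) 1).foldl (fun result k =>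
      let j := PySem.Int.floordiv k m
      let r := PySem.Int.mod k m
      let i := if PySem.Int.mod j 2 = 0 then r else m - 1 - r
      result ++ [pvIdx matrix i j]) []

-- ===== PRECONDITION & SPEC =====
-- Pre_ excludes exactly the ragged matrices on which Python A raises IndexError
-- (a row shorter than the first row, reached by matrix[i][j]).
def Pre_zigzag_column_traversal (matrix : List (List Int)) : Prop :=
  ∀ row ∈ matrix, (matrix.headD []).length ≤ row.length
instance (matrix : List (List Int)) : Decidable (Pre_zigzag_column_traversal matrix) := by
  unfold Pre_zigzag_column_traversal; infer_instance
def pvWitness_zigzag_column_traversal : List (List Int) := [[1, 2], [3, 4], [5, 6]]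

def Spec_zigzag_column_traversal (matrix : List (List Int)) (out : List Int) : Prop := out = zigzag_column_traversal_alt matrix
instance (matrix : List (List Int)) (out : List Int) : Decidable (Spec_zigzag_column_traversal matrix out) := by unfold Spec_zigzag_column_traversal; infer_instance

-- ===== CLAIM (what is proved, stated in full; the proofs are below) =====
def Claim_equal_zigzag_column_traversal : Prop := ∀ (matrix : List (List Int)), Dom_zigzag_column_traversal matrix → Pre_zigzag_column_traversal matrix → Spec_zigzag_column_traversal matrix (zigzag_column_traversal matrix)

-- ===== LEMMAS AND PROOFS =====

-- Block decomposition: one flat pass over range (m*n) reading (k//m, k%m)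
-- equals n passes of length m.
theorem pv_range_block {α : Type} (F : Int → Int → α) (m n : Nat) (hm : 0 < m) :
    (List.range n).flatMap (fun (j : Nat) => (List.range m).map (fun (r : Nat) => F (j : Int) (r : Int)))
      = (List.range (m * n)).map
          (fun (k : Nat) => F (PySem.Int.floordiv (k : Int) (m : Int)) (PySem.Int.mod (k : Int) (m : Int))) := by
  induction n with
  | zero => simp
  | succ n ih =>
    rw [List.range_succ, List.flatMap_append, ih, Nat.mul_succ, List.range_add,
      List.map_append, List.map_map]
    congr 1
    simp only [List.flatMap_singleton]
    apply List.map_congr_left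
    intro r hr
    rw [List.mem_range] at hr
    have hd : PySem.Int.floordiv ((m * n + r : Nat) : Int) (m : Int) = (n : Int) := by
      rw [PySem.Int.floordiv_natCast]
      congr 1
      rw [Nat.mul_add_div hm, Nat.div_eq_of_lt hr]
      omega
    have hmo : PySem.Int.mod ((m * n + r : Nat) : Int) (m : Int) = (r : Int) := by
      rw [PySem.Int.mod_natCast]
      congr 1
      rw [Nat.mul_add_mod, Nat.mod_eq_of_lt hr]
    simp only [Function.comp_apply, hd, hmo]

-- A's inner column loop (either direction) as a map over List.range M.
theorem pv_inner (g : Int → Int → Int) (M : Nat) (result : List Int) (j : Int) :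
    (if PySem.Int.mod j 2 = 0 then
      (PySem.List.pyRange 0 (M : Int) 1).foldl (fun result i => result ++ [g i j]) result
    else
      (PySem.List.pyRange ((M : Int) - 1) (-1) (-1)).foldl (fun result i => result ++ [g i j]) result)
    = result ++ (List.range M).map (fun (r : Nat) =>
        if PySem.Int.mod j 2 = 0 then g (r : Int) j else g ((M : Int) - 1 - (r : Int)) j) := by
  by_cases hj : PySem.Int.mod j 2 = 0 <;>
    simp only [hj, if_true, if_false, PySem.List.foldl_append_singleton_eq_map]
  · rw [PySem.List.pyRange_one]
    simp [Function.comp]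
  · rw [PySem.List.pyRange_neg_one]
    have h : ((M : Int) - 1 - (-1)).toNat = M := by omega
    rw [h, List.map_map]
    simp [Function.comp]

-- A's outer loop as a flatMap of columns.
theorem pv_foldl_flat (g : Int → Int → Int) (M : Nat) (l : List Nat) :
    List.foldl (fun result j =>
      if PySem.Int.mod j 2 = 0 then
        (PySem.List.pyRange 0 (M : Int) 1).foldl (fun result i => result ++ [g i j]) result
      else
        (PySem.List.pyRange ((M : Int) - 1) (-1) (-1)).foldl (fun result i => result ++ [g i j]) result)
      [] (l.map (fun (k : Nat) => (k : Int)))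
    = l.flatMap (fun (j : Nat) => (List.range M).map (fun (r : Nat) =>
        if PySem.Int.mod (j : Int) 2 = 0 then g (r : Int) (j : Int)
        else g ((M : Int) - 1 - (r : Int)) (j : Int))) := by
  induction l using List.reverseRecOn with
  | nil => rfl
  | append_singleton l x ihl =>
    rw [List.map_append, List.foldl_append, ihl, List.flatMap_append]
    simp only [List.map_cons, List.map_nil, List.foldl_cons, List.foldl_nil,
      List.flatMap_cons, List.flatMap_nil, List.append_nil]
    exact pv_inner g M _ _

theorem zigzag_agree (matrix : List (List Int)) :
    zigzag_column_traversal matrix = zigzag_column_traversal_alt matrix := by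
  unfold zigzag_column_traversal zigzag_column_traversal_alt
  split
  · rfl
  · rename_i hne
    dsimp only
    set M : Nat := matrix.length with hM
    set N : Nat := (matrix.headD []).length with hN
    have hm : 0 < M := by
      rcases matrix with _ | _ <;> simp_all
    -- B side: fold-append-singleton is a map over range (M*N)
    rw [PySem.List.foldl_append_singleton_eq_map]
    have hMN : (((M : Int)) * (N : Int) - 0).toNat = M * N := by omega
    conv_rhs => rw [PySem.List.pyRange_one, hMN, List.map_map]
    -- A side: outer range as a mapped List.range, then flatMap, then block lemma
    have hNr : PySem.List.pyRange 0 (N : Int) 1 = (List.range N).map (fun (k : Nat) => (k : Int)) := by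
      rw [PySem.List.pyRange_one]
      simp
    conv_lhs => rw [hNr]
    rw [pv_foldl_flat (fun i j => pvIdx matrix i j) M (List.range N),
      pv_range_block (fun j r =>
        if PySem.Int.mod j 2 = 0 then pvIdx matrix r j
        else pvIdx matrix ((M : Int) - 1 - r) j) M N hm]
    apply List.map_congr_left
    intro k _
    simp only [Function.comp_apply, zero_add]
    split <;> simp_all

-- ===== VERDICT (by name: the statement is the Claim_ definition above) =====
theorem zigzag_column_traversal_spec : Claim_equal_zigzag_column_traversal := by
  intro matrix _ _
  unfold Spec_zigzag_column_traversal
  exact zigzag_agree matrix
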